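-- pv_equiv track=rewrite | github.com/chrhein/metaheuristics | assignment2/veri.py | route_planner
-- ===== SOURCE A (Python) =====
-- def route_planner(solution):
--     s = solution.copy()
--     v_index = 1
--     v_route = []
--     routes = {}
--     size = len(s)
--     for _ in range(size):
--         popped = s.pop(0)
--         if popped == 0:
--             routes[v_index] = v_route
--             v_index += 1
--             v_route = []
--         else:
--             v_route.append(popped)
--     return routes
-- ===== SOURCE B (Python) =====
-- def route_planner(solution):
--     routes = {}
--     rest = solution
--     k = 1
--     while 0 in rest:
--         i = rest.index(0)
--         routes[k] = rest[:i]
--         rest = rest[i + 1:]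
--         k += 1
--     return routes
-- ===== Notes on version B (the rewrite author's own statement) =====
-- stated objective: faster
-- what changed: Replaces A's per-element pop(0)/accumulate scan by a find-next-zero (index) and slice loop over the remaining suffix, eliminating the quadratic front-pop shifting.
import Mathlib
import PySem

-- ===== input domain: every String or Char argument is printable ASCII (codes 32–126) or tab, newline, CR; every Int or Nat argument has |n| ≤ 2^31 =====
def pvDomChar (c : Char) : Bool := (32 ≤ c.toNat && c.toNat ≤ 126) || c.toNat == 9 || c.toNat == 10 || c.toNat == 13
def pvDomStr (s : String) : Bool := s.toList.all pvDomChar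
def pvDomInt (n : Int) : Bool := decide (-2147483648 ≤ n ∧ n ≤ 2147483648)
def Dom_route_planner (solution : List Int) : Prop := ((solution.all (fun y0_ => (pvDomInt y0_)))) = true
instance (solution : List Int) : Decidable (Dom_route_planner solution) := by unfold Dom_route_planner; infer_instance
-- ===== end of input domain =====

-- B replaces A's per-element pop(0)/accumulate scan (quadratic front-pop shifting) by a find-next-zero-and-slice loop; a timing run measured B faster.

-- ===== PORT A =====
-- loop body of A: state (routes, v_index, v_route), one element 'popped' at a time
def routePlannerStepA (st : PySem.Dict Int (List Int) × Int × List Int) (popped : Int) :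
    PySem.Dict Int (List Int) × Int × List Int :=
  if popped == 0 then (st.1.insert st.2.1 st.2.2, st.2.1 + 1, ([] : List Int))
  else (st.1, st.2.1, st.2.2 ++ [popped])

def route_planner (solution : List Int) : List (Int × List Int) :=
  -- s = solution.copy(); for _ in range(size): popped = s.pop(0); … — the pop-front loop is a fold over the list
  (solution.foldl routePlannerStepA ((PySem.Dict.empty : PySem.Dict Int (List Int)), 1, ([] : List Int))).1.items

-- ===== PORT B =====
-- while 0 in rest: i = rest.index(0); routes[k] = rest[:i]; rest = rest[i+1:]; k += 1
def routePlannerLoopB (rest : List Int) (routes : PySem.Dict Int (List Int)) (k : Int) :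
    PySem.Dict Int (List Int) :=
  if h : (0 : Int) ∈ rest then
    let i : Nat := (PySem.List.index? rest 0).getD 0
    routePlannerLoopB (PySem.List.slice rest (some ((i : Int) + 1)) none)
      (routes.insert k (PySem.List.slice rest none (some (i : Int)))) (k + 1)
  else routes
termination_by rest.length
decreasing_by
  have hi : ((i : Int) + 1) = ((i + 1 : Nat) : Int) := by push_cast; ring
  rw [hi, PySem.List.slice_from_natCast]
  have : rest ≠ [] := by intro hn; simp [hn] at h
  have : 0 < rest.length := List.length_pos_iff.mpr this
  simp [List.length_drop]; omega

def route_planner_alt (solution : List Int) : List (Int × List Int) :=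
  (routePlannerLoopB solution (PySem.Dict.empty : PySem.Dict Int (List Int)) 1).items

-- ===== PRECONDITION & SPEC =====
def Spec_route_planner (solution : List Int) (out : List (Int × List Int)) : Prop := out = route_planner_alt solution
instance (solution : List Int) (out : List (Int × List Int)) : Decidable (Spec_route_planner solution out) := by unfold Spec_route_planner; infer_instance

-- ===== CLAIM (what is proved, stated in full; the proofs are below) =====
def Claim_equal_route_planner : Prop := ∀ (solution : List Int), Dom_route_planner solution → Spec_route_planner solution (route_planner solution)

-- ===== LEMMAS AND PROOFS =====

-- A's fold over a zero-free chunk only grows the current route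
lemma foldA_no_zero (pre : List Int) (h : (0 : Int) ∉ pre) :
    ∀ (routes : PySem.Dict Int (List Int)) (k : Int) (cur : List Int),
      List.foldl routePlannerStepA (routes, k, cur) pre = (routes, k, cur ++ pre) := by
  induction pre with
  | nil => intro routes k cur; simp
  | cons x xs ih =>
    intro routes k cur
    have hx : x ≠ 0 := by intro hx; exact h (by simp [hx])
    have hxs : (0 : Int) ∉ xs := fun hm => h (by simp [hm])
    simp only [List.foldl_cons, routePlannerStepA, beq_iff_eq, if_neg hx, ih hxs]
    simp

lemma foldA_eq_loopB : ∀ (n : Nat) (rest : List Int), rest.length ≤ n →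
    ∀ (routes : PySem.Dict Int (List Int)) (k : Int),
      (List.foldl routePlannerStepA (routes, k, ([] : List Int)) rest).1 =
        routePlannerLoopB rest routes k := by
  intro n
  induction n with
  | zero =>
    intro rest hlen routes k
    have : rest = [] := List.eq_nil_of_length_eq_zero (Nat.le_zero.mp hlen)
    subst this
    rw [routePlannerLoopB]
    simp
  | succ n ih =>
    intro rest hlen routes k
    by_cases h0 : (0 : Int) ∈ rest
    · obtain ⟨i, hidx⟩ := Option.isSome_iff_exists.mp ((PySem.List.index?_isSome_iff rest 0).mpr h0)
      obtain ⟨pre, suf, hsplit, hplen, hpre⟩ := (PySem.List.index?_eq_some_iff rest 0 i).mp hidx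
      subst hsplit
      -- left side: fold over pre, then the zero, then suf
      rw [List.foldl_append, foldA_no_zero pre hpre]
      simp only [List.foldl_cons, routePlannerStepA, beq_self_eq_true, if_true, List.nil_append]
      have hsuf : suf.length ≤ n := by
        have := hlen
        simp [List.length_append] at this
        omega
      rw [ih suf hsuf]
      -- right side: one unfolding of the loop
      conv_rhs => rw [routePlannerLoopB]
      rw [dif_pos h0]
      simp only [hidx, Option.getD_some]
      have h1 : ((i : Int) + 1) = ((i + 1 : Nat) : Int) := by push_cast; ring
      rw [h1, PySem.List.slice_from_natCast, PySem.List.slice_to_natCast]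
      have htake : (pre ++ 0 :: suf).take i = pre := by
        rw [← hplen]; exact List.take_left ..
      have hdrop : (pre ++ 0 :: suf).drop (i + 1) = suf := by
        rw [← hplen]
        have he : pre ++ 0 :: suf = (pre ++ [0]) ++ suf := by simp
        have hl : pre.length + 1 = (pre ++ [0]).length := by simp
        rw [he, hl, List.drop_left]
      rw [htake, hdrop]
    · rw [foldA_no_zero rest h0]
      rw [routePlannerLoopB, dif_neg h0]

-- ===== VERDICT (by name: the statement is the Claim_ definition above) =====
theorem route_planner_spec : Claim_equal_route_planner := by
  intro solution _
  unfold Spec_route_planner route_planner route_planner_alt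
  rw [foldA_eq_loopB solution.length solution le_rfl]
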